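-- pv_equiv track=rewrite | github.com/changpil/pyPractice | CodingInterviews/InterviewQuestions/faceboook/SchoolVotes.py | foo
-- ===== SOURCE A (Python) =====
-- def foo(arr):
--     h = {}
--     n = len(arr)
--     can1, can2 = 0,0
--     for i in range(len(arr)):
--         if arr[i] < 0:
--             h[i] = 1
--             can1 += 1
--         elif 0 <= arr[i] < n:
--             h[i] = -1
--         else:
--             h[i] = 2
--             can2 += 1
--     for i in range(len(arr)):
--         if 0 <= arr[i] < n:
--             re = checkVote(arr, h, i)
--             if re == 1:
--                 can1 += 1
--             elif re == 2:
--                 can2 += 1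
--     return can1
--
-- def checkVote(arr, h, i):
--     if arr[i] == i:
--         return -1
--     if h[i] != -1:
--         return h[i]
--     return checkVote(arr, h, arr[i])
-- ===== SOURCE B (Python) =====
-- def foo(arr):
--     n = len(arr)
--     memo = {}  # index -> resolved outcome (1, 2, or -1), cached along followed chains
--     count = 0
--     for i in range(n):
--         a = arr[i]
--         if a < 0:
--             count += 1
--         elif a < n:  # 0 <= a < n since a < 0 already failed
--             path = []
--             j = i
--             while True:
--                 if j in memo:
--                     r = memo[j]
--                     break
--                 aj = arr[j]
--                 if aj < 0:
--                     r = 1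
--                     break
--                 if aj >= n:
--                     r = 2
--                     break
--                 if aj == j:
--                     r = -1
--                     break
--                 path.append(j)
--                 j = aj
--             for k in path:
--                 memo[k] = r
--             if r == 1:
--                 count += 1
--     return count
-- ===== Notes on version B (the rewrite author's own statement) =====
-- stated objective: faster
-- what changed: B resolves each vote chain iteratively once and memoizes the resolved candidate for every index on the followed path, so shared chain suffixes are never re-walked, replacing A's unmemoized recursive chain-following per index.
import Mathlib
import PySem

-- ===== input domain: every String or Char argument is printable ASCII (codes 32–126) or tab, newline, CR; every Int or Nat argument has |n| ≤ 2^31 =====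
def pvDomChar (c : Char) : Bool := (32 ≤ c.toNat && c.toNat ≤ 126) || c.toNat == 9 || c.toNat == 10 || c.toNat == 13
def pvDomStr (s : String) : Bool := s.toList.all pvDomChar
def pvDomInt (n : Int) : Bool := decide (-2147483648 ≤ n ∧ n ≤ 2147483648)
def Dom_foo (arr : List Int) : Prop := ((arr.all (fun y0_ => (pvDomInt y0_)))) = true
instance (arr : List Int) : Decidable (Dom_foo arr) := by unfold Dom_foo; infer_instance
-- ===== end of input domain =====

-- B resolves each vote chain iteratively once and memoizes the result for every index on the
-- followed path, instead of A's unmemoized recursive chain-following per index.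

-- ===== PORT A =====
-- checkVote(arr, h, i): Python recursion is unbounded; under Pre_foo every chain stops within
-- arr.length steps, so fuel arr.length+1 suffices (the fuel-out value 0 is never reached under Pre_foo).
-- h[i] never misses a key in any reachable call (h's keys are exactly range(n)), so getD is exact here.
def checkVote (arr : List Int) (h : PySem.Dict Int Int) : Nat → Int → Int
  | 0, _ => 0
  | fuel+1, i =>
    let ai := PySem.List.pyGetD arr i 0
    if ai = i then -1
    else if h.getD i 0 ≠ -1 then h.getD i 0
    else checkVote arr h fuel ai

-- body of A's first loop (builds h, counts can1/can2)
def aStep1 (arr : List Int) (st : PySem.Dict Int Int × Int × Int) (i : Int) :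
    PySem.Dict Int Int × Int × Int :=
  let ai := PySem.List.pyGetD arr i 0
  if ai < 0 then (st.1.insert i 1, st.2.1 + 1, st.2.2)
  else if 0 ≤ ai ∧ ai < (arr.length : Int) then (st.1.insert i (-1), st.2.1, st.2.2)
  else (st.1.insert i 2, st.2.1, st.2.2 + 1)

-- body of A's second loop (resolves each delegated vote with checkVote)
def aStep2 (arr : List Int) (h : PySem.Dict Int Int) (st : Int × Int) (i : Int) : Int × Int :=
  let ai := PySem.List.pyGetD arr i 0
  if 0 ≤ ai ∧ ai < (arr.length : Int) then
    let re := checkVote arr h (arr.length + 1) i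
    if re = 1 then (st.1 + 1, st.2)
    else if re = 2 then (st.1, st.2 + 1)
    else st
  else st

def foo (arr : List Int) : Int :=
  let n : Int := arr.length
  let s1 := (PySem.List.pyRange 0 n 1).foldl (aStep1 arr) (PySem.Dict.empty, 0, 0)
  let s2 := (PySem.List.pyRange 0 n 1).foldl (aStep2 arr s1.1) (s1.2.1, s1.2.2)
  s2.1

-- ===== PORT B =====
-- the 'while True' loop of Source B: follow the chain from j collecting the path until a memo hit or a
-- terminal vote; fuel arr.length+1 suffices under Pre_foo (the fuel-out value is never reached).
def resolveLoop (arr : List Int) (n : Int) (memo : PySem.Dict Int Int) :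
    Nat → Int → List Int → Int × List Int
  | 0, _, path => (0, path)
  | fuel+1, j, path =>
    match memo.get? j with
    | some r => (r, path)
    | none =>
      let aj := PySem.List.pyGetD arr j 0
      if aj < 0 then (1, path)
      else if n ≤ aj then (2, path)
      else if aj = j then (-1, path)
      else resolveLoop arr n memo fuel aj (path ++ [j])

-- body of Source B's single loop
def bStep (arr : List Int) (st : PySem.Dict Int Int × Int) (i : Int) : PySem.Dict Int Int × Int :=
  let a := PySem.List.pyGetD arr i 0
  if a < 0 then (st.1, st.2 + 1)
  else if a < (arr.length : Int) then
    let rp := resolveLoop arr (arr.length : Int) st.1 (arr.length + 1) i []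
    let memo' := rp.2.foldl (fun m k => m.insert k rp.1) st.1
    (memo', if rp.1 = 1 then st.2 + 1 else st.2)
  else st

def foo_alt (arr : List Int) : Int :=
  ((PySem.List.pyRange 0 (arr.length : Int) 1).foldl (bStep arr) (PySem.Dict.empty, 0)).2

-- ===== PRECONDITION & SPEC =====
-- pvStops: the vote chain stops at j (self-vote, or a vote for candidate 1 / candidate 2);
-- pvStep: one chain step (identity where the chain stops).
def pvStops (arr : List Int) (j : Int) : Bool :=
  PySem.List.pyGetD arr j 0 = j ∨ PySem.List.pyGetD arr j 0 < 0 ∨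
    (arr.length : Int) ≤ PySem.List.pyGetD arr j 0
def pvStep (arr : List Int) (j : Int) : Int :=
  if pvStops arr j then j else PySem.List.pyGetD arr j 0

-- Pre_foo excludes exactly the inputs whose vote chains cycle (cycle length ≥ 2): there the
-- Python A's unbounded recursion raises RecursionError.
def Pre_foo (arr : List Int) : Prop :=
  ∀ i < arr.length, ∃ k < arr.length + 1, pvStops arr ((pvStep arr)^[k] (i : Int)) = true
instance (arr : List Int) : Decidable (Pre_foo arr) := by unfold Pre_foo; infer_instance
def pvWitness_foo : List Int := [1, 2, -1, 0, 99]

def Spec_foo (arr : List Int) (out : Int) : Prop := out = foo_alt arr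
instance (arr : List Int) (out : Int) : Decidable (Spec_foo arr out) := by unfold Spec_foo; infer_instance

-- ===== CLAIM (what is proved, stated in full; the proofs are below) =====
def Claim_equal_foo : Prop := ∀ (arr : List Int), Dom_foo arr → Pre_foo arr → Spec_foo arr (foo arr)

-- ===== LEMMAS AND PROOFS =====

-- canonical resolution of the chain starting at j (none = fuel exhausted)
def cres (arr : List Int) : Nat → Int → Option Int
  | 0, _ => none
  | f+1, j =>
    let a := PySem.List.pyGetD arr j 0
    if a < 0 then some 1
    else if (arr.length : Int) ≤ a then some 2
    else if a = j then some (-1)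
    else cres arr f a

theorem cres_succ (arr : List Int) (f : Nat) (j : Int) :
    cres arr (f + 1) j =
      (if PySem.List.pyGetD arr j 0 < 0 then some 1
       else if (arr.length : Int) ≤ PySem.List.pyGetD arr j 0 then some 2
       else if PySem.List.pyGetD arr j 0 = j then some (-1)
       else cres arr f (PySem.List.pyGetD arr j 0)) := rfl

theorem cres_mono (arr : List Int) : ∀ (f f' : Nat) (j r : Int), f ≤ f' →
    cres arr f j = some r → cres arr f' j = some r := by
  intro f
  induction f with
  | zero => intro f' j r _ h; simp [cres] at h
  | succ f ih =>
    intro f' j r hle h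
    obtain ⟨f'', rfl⟩ : ∃ f'', f' = f'' + 1 := ⟨f' - 1, by omega⟩
    rw [cres_succ] at h ⊢
    split_ifs at h ⊢ <;> try exact h
    exact ih f'' _ r (by omega) h

theorem cres_total (arr : List Int) : ∀ (m : Nat) (j : Int), 0 ≤ j →
    (∃ k ≤ m, pvStops arr ((pvStep arr)^[k] j) = true) → (cres arr (m + 1) j).isSome := by
  intro m
  induction m with
  | zero =>
    intro j _ ⟨k, hk, hs⟩
    interval_cases k
    simp only [Function.iterate_zero, id_eq, pvStops, decide_eq_true_eq] at hs
    rw [cres_succ]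
    split_ifs with c1 c2 c3
    · simp
    · simp
    · simp
    · exfalso; rcases hs with h | h | h <;> omega
  | succ m ih =>
    intro j hj ⟨k, hk, hs⟩
    by_cases hstop : pvStops arr j = true
    · simp only [pvStops, decide_eq_true_eq] at hstop
      rw [cres_succ]
      split_ifs with c1 c2 c3
      · simp
      · simp
      · simp
      · exfalso; rcases hstop with h | h | h <;> omega
    · have hcomp : ¬ (PySem.List.pyGetD arr j 0 = j ∨ PySem.List.pyGetD arr j 0 < 0 ∨
          (arr.length : Int) ≤ PySem.List.pyGetD arr j 0) := by
        intro h
        exact hstop (by simp only [pvStops, decide_eq_true_eq]; exact h)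
      push_neg at hcomp
      obtain ⟨hne, hge, hlt⟩ := hcomp
      have hstep : pvStep arr j = PySem.List.pyGetD arr j 0 := by
        simp [pvStep, hstop]
      have hk0 : k ≠ 0 := by
        intro h; subst h
        simp only [Function.iterate_zero, id_eq] at hs
        exact hstop hs
      obtain ⟨k', rfl⟩ : ∃ k', k = k' + 1 := ⟨k - 1, by omega⟩
      rw [Function.iterate_succ_apply, hstep] at hs
      rw [cres_succ, if_neg (by omega), if_neg (by omega), if_neg hne]
      exact ih (PySem.List.pyGetD arr j 0) (by omega) ⟨k', by omega, hs⟩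

-- the per-index classification A stores in h
def classOf (arr : List Int) (i : Int) : Int :=
  let ai := PySem.List.pyGetD arr i 0
  if ai < 0 then 1 else if 0 ≤ ai ∧ ai < (arr.length : Int) then -1 else 2

theorem aStep1_dict (arr : List Int) (st : PySem.Dict Int Int × Int × Int) (x : Int) :
    (aStep1 arr st x).1 = st.1.insert x (classOf arr x) := by
  simp only [aStep1, classOf]
  split_ifs <;> rfl

-- A's first loop: dict lookup characterisation
theorem foldA_get? (arr : List Int) (j : Int) :
    ∀ (l : List Int) (st : PySem.Dict Int Int × Int × Int),
    ((l.foldl (aStep1 arr) st).1).get? j = if j ∈ l then some (classOf arr j) else st.1.get? j := by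
  intro l
  induction l with
  | nil => intro st; simp
  | cons x l ih =>
    intro st
    simp only [List.foldl_cons, ih, List.mem_cons]
    by_cases hjl : j ∈ l
    · simp [hjl]
    · by_cases hjx : j = x
      · subst hjx
        simp [hjl, aStep1_dict, PySem.Dict.get?_insert_self]
      · simp [hjl, hjx, aStep1_dict, PySem.Dict.get?_insert]

-- A's first loop: the can1 component counts the negative (candidate-1) votes
theorem foldA_cnt (arr : List Int) :
    ∀ (l : List Int) (st : PySem.Dict Int Int × Int × Int),
    ((l.foldl (aStep1 arr) st).2).1 =
      st.2.1 + (l.map (fun i => if PySem.List.pyGetD arr i 0 < 0 then (1 : Int) else 0)).sum := by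
  intro l
  induction l with
  | nil => intro st; simp
  | cons x l ih =>
    intro st
    simp only [List.foldl_cons, List.map_cons, List.sum_cons, ih, aStep1]
    split_ifs <;> simp <;> ring

theorem checkVote_succ (arr : List Int) (h : PySem.Dict Int Int) (fuel : Nat) (i : Int) :
    checkVote arr h (fuel + 1) i =
      (if PySem.List.pyGetD arr i 0 = i then -1
       else if h.getD i 0 ≠ -1 then h.getD i 0
       else checkVote arr h fuel (PySem.List.pyGetD arr i 0)) := rfl

-- checkVote computes the canonical chain resolution
theorem checkVote_cres (arr : List Int) (h : PySem.Dict Int Int)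
    (hGood : ∀ j : Int, 0 ≤ j → j < (arr.length : Int) → h.getD j 0 = classOf arr j) :
    ∀ (fuel : Nat) (i r : Int), 0 ≤ i → i < (arr.length : Int) →
    cres arr fuel i = some r → checkVote arr h fuel i = r := by
  intro fuel
  induction fuel with
  | zero => intro i r _ _ hc; simp [cres] at hc
  | succ fuel ih =>
    intro i r h0 h1 hc
    rw [cres_succ] at hc
    rw [checkVote_succ, hGood i h0 h1]
    simp only [classOf]
    split_ifs at hc with c1 c2 c3
    · -- arr[i] < 0 : r = 1
      have hne : PySem.List.pyGetD arr i 0 ≠ i := by omega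
      rw [if_neg hne]
      simp only [if_pos c1]
      rw [← Option.some.inj hc]
      norm_num
    · -- arr[i] ≥ n : r = 2
      have hne : PySem.List.pyGetD arr i 0 ≠ i := by omega
      have hcc : ¬ (0 ≤ PySem.List.pyGetD arr i 0 ∧ PySem.List.pyGetD arr i 0 < (arr.length : Int)) := by
        omega
      rw [if_neg hne]
      simp only [if_neg c1, if_neg hcc]
      rw [← Option.some.inj hc]
      norm_num
    · -- arr[i] = i : r = -1
      rw [if_pos c3, ← Option.some.inj hc]
    · -- delegation
      have hrange : 0 ≤ PySem.List.pyGetD arr i 0 ∧ PySem.List.pyGetD arr i 0 < (arr.length : Int) := by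
        omega
      rw [if_neg c3]
      simp only [if_neg c1, if_pos hrange]
      rw [if_neg (by norm_num)]
      exact ih _ r hrange.1 hrange.2 hc

-- A's second loop adds the per-index contributions
theorem foldA2 (arr : List Int) (h : PySem.Dict Int Int) :
    ∀ (l : List Int) (st : Int × Int),
    (l.foldl (aStep2 arr h) st).1 =
      st.1 + (l.map (fun i =>
        if 0 ≤ PySem.List.pyGetD arr i 0 ∧ PySem.List.pyGetD arr i 0 < (arr.length : Int) then
          (if checkVote arr h (arr.length + 1) i = 1 then (1 : Int) else 0) else 0)).sum := by
  intro l
  induction l with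
  | nil => intro st; simp
  | cons x l ih =>
    intro st
    simp only [List.foldl_cons, List.map_cons, List.sum_cons, ih, aStep2]
    split_ifs <;> simp <;> ring

-- memo invariant: every cached value is the canonical resolution
def MemoInv (arr : List Int) (memo : PySem.Dict Int Int) : Prop :=
  ∀ j r : Int, memo.get? j = some r → cres arr (arr.length + 1) j = some r

theorem resolveLoop_succ_memo (arr : List Int) (n : Int) (memo : PySem.Dict Int Int)
    (fuel : Nat) (j : Int) (path : List Int) (r : Int) (hm : memo.get? j = some r) :
    resolveLoop arr n memo (fuel + 1) j path = (r, path) := by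
  simp only [resolveLoop, hm]

theorem resolveLoop_succ_none (arr : List Int) (n : Int) (memo : PySem.Dict Int Int)
    (fuel : Nat) (j : Int) (path : List Int) (hm : memo.get? j = none) :
    resolveLoop arr n memo (fuel + 1) j path =
      (if PySem.List.pyGetD arr j 0 < 0 then ((1 : Int), path)
       else if n ≤ PySem.List.pyGetD arr j 0 then ((2 : Int), path)
       else if PySem.List.pyGetD arr j 0 = j then ((-1 : Int), path)
       else resolveLoop arr n memo fuel (PySem.List.pyGetD arr j 0) (path ++ [j])) := by
  simp only [resolveLoop, hm]

-- resolveLoop under the invariant: returns the canonical value; new path entries are resolved indices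
theorem resolveLoop_spec (arr : List Int) (memo : PySem.Dict Int Int) (hInv : MemoInv arr memo) :
    ∀ (fuel : Nat) (j r : Int) (path : List Int), fuel ≤ arr.length + 1 →
    cres arr fuel j = some r →
    (resolveLoop arr (arr.length : Int) memo fuel j path).1 = r ∧
    ∀ x ∈ (resolveLoop arr (arr.length : Int) memo fuel j path).2,
      x ∈ path ∨ cres arr (arr.length + 1) x = some r := by
  intro fuel
  induction fuel with
  | zero => intro j r path _ hc; simp [cres] at hc
  | succ fuel ih =>
    intro j r path hfle hc
    have hcj := hc
    cases hm : memo.get? j with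
    | some r' =>
      rw [resolveLoop_succ_memo arr _ memo fuel j path r' hm]
      have h1 := hInv j r' hm
      have h2 := cres_mono arr (fuel + 1) (arr.length + 1) j r hfle hc
      have hrr : r' = r := by rw [h1] at h2; exact Option.some.inj h2
      subst hrr
      exact ⟨rfl, fun x hx => Or.inl hx⟩
    | none =>
      rw [resolveLoop_succ_none arr _ memo fuel j path hm]
      rw [cres_succ] at hc
      split_ifs at hc ⊢ with c1 c2 c3
      · exact ⟨Option.some.inj hc, fun x hx => Or.inl hx⟩
      · exact ⟨Option.some.inj hc, fun x hx => Or.inl hx⟩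
      · exact ⟨Option.some.inj hc, fun x hx => Or.inl hx⟩
      · have hrec := ih (PySem.List.pyGetD arr j 0) r (path ++ [j]) (by omega) hc
        refine ⟨hrec.1, ?_⟩
        intro x hx
        rcases hrec.2 x hx with hmem2 | hres
        · rcases List.mem_append.mp hmem2 with hp | hp
          · exact Or.inl hp
          · simp only [List.mem_singleton] at hp
            subst hp
            exact Or.inr (cres_mono arr (fuel + 1) (arr.length + 1) x r hfle hcj)
        · exact Or.inr hres

-- lookup in a memo after caching a path
theorem get?_foldl_insert (r : Int) (j : Int) :
    ∀ (P : List Int) (m : PySem.Dict Int Int),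
    (P.foldl (fun m k => m.insert k r) m).get? j = if j ∈ P then some r else m.get? j := by
  intro P
  induction P with
  | nil => intro m; simp
  | cons x P ih =>
    intro m
    simp only [List.foldl_cons, ih, List.mem_cons]
    by_cases hjP : j ∈ P
    · simp [hjP]
    · by_cases hjx : j = x
      · subst hjx; simp [hjP, PySem.Dict.get?_insert_self]
      · simp [hjP, hjx, PySem.Dict.get?_insert]

-- B's loop: counts the canonical contributions while preserving the invariant
theorem foldB (arr : List Int)
    (H : ∀ i : Int, 0 ≤ i → i < (arr.length : Int) → (cres arr (arr.length + 1) i).isSome) :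
    ∀ (l : List Int) (st : PySem.Dict Int Int × Int),
    (∀ i ∈ l, 0 ≤ i ∧ i < (arr.length : Int)) → MemoInv arr st.1 →
    (l.foldl (bStep arr) st).2 =
      st.2 + (l.map (fun i =>
        if PySem.List.pyGetD arr i 0 < 0 then (1 : Int)
        else if PySem.List.pyGetD arr i 0 < (arr.length : Int) then
          (if cres arr (arr.length + 1) i = some 1 then (1 : Int) else 0)
        else 0)).sum := by
  intro l
  induction l with
  | nil => intro st _ _; simp
  | cons x l ih =>
    intro st hmem hInv
    have hx := hmem x (List.mem_cons_self)
    simp only [List.foldl_cons, List.map_cons, List.sum_cons]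
    by_cases c1 : PySem.List.pyGetD arr x 0 < 0
    · have hb : bStep arr st x = (st.1, st.2 + 1) := by simp [bStep, c1]
      rw [hb, ih (st.1, st.2 + 1) (fun i hi => hmem i (List.mem_cons_of_mem _ hi)) hInv]
      simp [c1]
      ring
    · by_cases c2 : PySem.List.pyGetD arr x 0 < (arr.length : Int)
      · have hsome := H x hx.1 hx.2
        obtain ⟨r, hr⟩ := Option.isSome_iff_exists.mp hsome
        have hspec := resolveLoop_spec arr st.1 hInv (arr.length + 1) x r [] (le_refl _) hr
        have hb : bStep arr st x =
            ((resolveLoop arr (arr.length : Int) st.1 (arr.length + 1) x []).2.foldl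
              (fun m k => m.insert k (resolveLoop arr (arr.length : Int) st.1 (arr.length + 1) x []).1) st.1,
             if (resolveLoop arr (arr.length : Int) st.1 (arr.length + 1) x []).1 = 1
             then st.2 + 1 else st.2) := by
          simp [bStep, c1, c2]
        have hInv' : MemoInv arr ((resolveLoop arr (arr.length : Int) st.1 (arr.length + 1) x []).2.foldl
            (fun m k => m.insert k (resolveLoop arr (arr.length : Int) st.1 (arr.length + 1) x []).1) st.1) := by
          intro j r' hj
          rw [get?_foldl_insert] at hj
          split_ifs at hj with hjmem
          · rcases hspec.2 j hjmem with hcontr | hres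
            · simp at hcontr
            · rw [← Option.some.inj hj, hspec.1]
              exact hres
          · exact hInv j r' hj
        rw [hb, ih ((resolveLoop arr (arr.length : Int) st.1 (arr.length + 1) x []).2.foldl
              (fun m k => m.insert k (resolveLoop arr (arr.length : Int) st.1 (arr.length + 1) x []).1) st.1,
             if (resolveLoop arr (arr.length : Int) st.1 (arr.length + 1) x []).1 = 1
             then st.2 + 1 else st.2) (fun i hi => hmem i (List.mem_cons_of_mem _ hi)) hInv']
        rw [hspec.1]
        by_cases hr1 : r = 1
        · subst hr1
          simp only [if_pos rfl, c1, if_false, c2, if_true, hr, if_pos rfl]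
          ring
        · have hne1 : cres arr (arr.length + 1) x ≠ some 1 := by
            rw [hr]
            exact fun hcon => hr1 (Option.some.inj hcon)
          simp only [if_neg hr1, c1, if_false, c2, if_true, if_neg hne1]
          ring
      · have hb : bStep arr st x = st := by simp [bStep, c1, c2]
        rw [hb, ih st (fun i hi => hmem i (List.mem_cons_of_mem _ hi)) hInv]
        simp [c1, c2]

theorem pv_sum_map_add (l : List Int) (f g : Int → Int) :
    (l.map f).sum + (l.map g).sum = (l.map (fun i => f i + g i)).sum := by
  induction l with
  | nil => simp
  | cons x l ih => simp only [List.map_cons, List.sum_cons]; rw [← ih]; ring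

theorem mem_range_bound (n : Nat) (i : Int) (h : i ∈ PySem.List.pyRange 0 (n : Int) 1) :
    0 ≤ i ∧ i < (n : Int) := by
  rw [PySem.List.mem_pyRange_one] at h
  omega

theorem pre_gives_total (arr : List Int) (hpre : Pre_foo arr) :
    ∀ i : Int, 0 ≤ i → i < (arr.length : Int) → (cres arr (arr.length + 1) i).isSome := by
  intro i h0 h1
  have hi : i.toNat < arr.length := by omega
  obtain ⟨k, hk, hs⟩ := hpre i.toNat hi
  have hcast : (i.toNat : Int) = i := by omega
  rw [hcast] at hs
  exact cres_total arr arr.length i h0 ⟨k, by omega, hs⟩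

-- ===== VERDICT (by name: the statement is the Claim_ definition above) =====
theorem foo_spec : Claim_equal_foo := by
  intro arr _ hpre
  unfold Spec_foo
  simp only [foo, foo_alt]
  have H := pre_gives_total arr hpre
  have hmem : ∀ i ∈ PySem.List.pyRange 0 (arr.length : Int) 1, 0 ≤ i ∧ i < (arr.length : Int) :=
    fun i hi => mem_range_bound arr.length i hi
  rw [foldB arr H _ _ hmem (by intro j r h; simp [PySem.Dict.get?_empty] at h)]
  rw [foldA2, foldA_cnt]
  simp only [zero_add]
  -- the dict built by A's first loop stores classOf
  have hGood : ∀ j : Int, 0 ≤ j → j < (arr.length : Int) →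
      (((PySem.List.pyRange 0 (arr.length : Int) 1).foldl (aStep1 arr)
        (PySem.Dict.empty, 0, 0)).1).getD j 0 = classOf arr j := by
    intro j h0 h1
    have hjl : j ∈ PySem.List.pyRange 0 (arr.length : Int) 1 := by
      rw [PySem.List.mem_pyRange_one]; omega
    rw [PySem.Dict.getD_eq_get?_getD, foldA_get?, if_pos hjl]
    rfl
  rw [pv_sum_map_add]
  congr 1
  apply List.map_congr_left
  intro i hi
  have hib := hmem i hi
  by_cases c1 : PySem.List.pyGetD arr i 0 < 0
  · have hno : ¬ (0 ≤ PySem.List.pyGetD arr i 0 ∧ PySem.List.pyGetD arr i 0 < (arr.length : Int)) := by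
      omega
    simp [c1, hno]
  · by_cases c2 : PySem.List.pyGetD arr i 0 < (arr.length : Int)
    · have hd : 0 ≤ PySem.List.pyGetD arr i 0 ∧ PySem.List.pyGetD arr i 0 < (arr.length : Int) := by
        omega
      obtain ⟨r, hr⟩ := Option.isSome_iff_exists.mp (H i hib.1 hib.2)
      have hcv := checkVote_cres arr _ hGood (arr.length + 1) i r hib.1 hib.2 hr
      rw [hcv, hr]
      by_cases hr1 : r = 1
      · subst hr1; simp [c1, c2, hd]
      · have hne1 : (some r : Option Int) ≠ some 1 := fun hcon => hr1 (Option.some.inj hcon)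
        simp [c1, c2, hd, hr1, hne1]
    · have hno : ¬ (0 ≤ PySem.List.pyGetD arr i 0 ∧ PySem.List.pyGetD arr i 0 < (arr.length : Int)) := by
        omega
      simp [c1, c2, hno]
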